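-- pv_equiv track=rewrite | github.com/lunnlew/m3u-filter | backend/m3u_generator.py | _deduplicate_channels
-- ===== SOURCE A (Python) =====
-- from typing import List, Dict
--
-- def _deduplicate_channels(channels: List[Dict]) -> List[Dict]:
--     """去除重复的URL，优先保留具有catchup或catchup_source的记录"""
--     url_map = {}
--     for channel in channels:
--         url = channel.get('stream_url')
--         if not url:
--             continue
--
--         if url not in url_map:
--             url_map[url] = channel
--         else:
--             # 如果新的channel有catchup或catchup_source，而现有的没有，则替换
--             existing = url_map[url]
--             new_has_catchup = channel.get('catchup') or channel.get('catchup_source')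
--             existing_has_catchup = existing.get('catchup') or existing.get('catchup_source')
--
--             if new_has_catchup and not existing_has_catchup:
--                 url_map[url] = channel
--
--     return list(url_map.values())
-- ===== SOURCE B (Python) =====
-- def _deduplicate_channels(channels):
--     """Group channels by stream_url, then pick per group the first catchup-capable channel (else the first)."""
--     groups = {}
--     for channel in channels:
--         url = channel.get('stream_url')
--         if not url:
--             continue
--         groups.setdefault(url, []).append(channel)
--     return [next((c for c in lst if c.get('catchup') or c.get('catchup_source')), lst[0])
--             for lst in groups.values()]
-- ===== Notes on version B (the rewrite author's own statement) =====
-- stated objective: alternative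
-- what changed: Replaced A's incremental compare-and-replace dedup pass (keeping one channel per URL and conditionally overwriting it) with a two-phase group-then-select: first group all channels by stream_url into lists preserving first-occurrence order, then pick from each group the first channel with catchup/catchup_source, falling back to the group's first element.
import Mathlib
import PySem

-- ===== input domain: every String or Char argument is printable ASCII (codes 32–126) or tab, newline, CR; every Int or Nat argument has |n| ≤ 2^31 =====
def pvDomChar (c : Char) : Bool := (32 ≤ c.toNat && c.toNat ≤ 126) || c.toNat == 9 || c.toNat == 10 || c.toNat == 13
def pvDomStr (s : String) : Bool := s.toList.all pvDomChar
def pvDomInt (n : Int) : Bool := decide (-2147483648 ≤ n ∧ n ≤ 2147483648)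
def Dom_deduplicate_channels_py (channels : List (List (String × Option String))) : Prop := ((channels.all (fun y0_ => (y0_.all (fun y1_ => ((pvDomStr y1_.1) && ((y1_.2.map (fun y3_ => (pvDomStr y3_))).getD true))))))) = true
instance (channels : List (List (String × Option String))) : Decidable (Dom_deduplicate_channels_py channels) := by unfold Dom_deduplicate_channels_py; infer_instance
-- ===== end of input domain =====

-- B replaces A's incremental compare-and-replace pass with a group-by-URL then select-per-group decomposition; same result, objective: alternative.

-- shared Python-semantics helpers (both sources contain the same `.get`/truthiness expressions)
def pvTruthy : Option (Option String) → Bool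
  | some (some s) => !(s == "")
  | _ => false

def pvGet (c : List (String × Option String)) (k : String) : Option (Option String) :=
  (PySem.Dict.mk c).get? k

def pvHasCatchup (c : List (String × Option String)) : Bool :=
  pvTruthy (pvGet c "catchup") || pvTruthy (pvGet c "catchup_source")

-- ===== PORT A =====
def pvStepA (m : PySem.Dict String (List (String × Option String))) (channel : List (String × Option String)) :
    PySem.Dict String (List (String × Option String)) :=
  match pvGet channel "stream_url" with
  | some (some url) =>
    if url == "" then m
    else
      match m.get? url with
      | none => m.insert url channel
      | some existing =>
        if pvHasCatchup channel && !pvHasCatchup existing then m.insert url channel else m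
  | _ => m

def deduplicate_channels_py (channels : List (List (String × Option String))) : List (List (String × Option String)) :=
  (channels.foldl pvStepA PySem.Dict.empty).values

-- ===== PORT B =====
def pvSelect (lst : List (List (String × Option String))) : List (String × Option String) :=
  match lst.find? pvHasCatchup with
  | some c => c
  | none => lst.headD []

def pvStepB (g : PySem.Dict String (List (List (String × Option String)))) (channel : List (String × Option String)) :
    PySem.Dict String (List (List (String × Option String))) :=
  match pvGet channel "stream_url" with
  | some (some url) =>
    if url == "" then g else g.modify url [] (· ++ [channel])
  | _ => g

def deduplicate_channels_py_alt (channels : List (List (String × Option String))) : List (List (String × Option String)) :=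
  ((channels.foldl pvStepB PySem.Dict.empty).values).map pvSelect

-- ===== PRECONDITION & SPEC =====
def Spec_deduplicate_channels_py (channels : List (List (String × Option String))) (out : List (List (String × Option String))) : Prop := out = deduplicate_channels_py_alt channels
instance (channels : List (List (String × Option String))) (out : List (List (String × Option String))) : Decidable (Spec_deduplicate_channels_py channels out) := by unfold Spec_deduplicate_channels_py; infer_instance

-- ===== CLAIM (what is proved, stated in full; the proofs are below) =====
def Claim_equal_deduplicate_channels_py : Prop := ∀ (channels : List (List (String × Option String))), Dom_deduplicate_channels_py channels → Spec_deduplicate_channels_py channels (deduplicate_channels_py channels)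

-- ===== LEMMAS AND PROOFS =====

-- value written per group entry by B, as seen through B's final selection
def pvSel (p : String × List (List (String × Option String))) : String × List (String × Option String) :=
  (p.1, pvSelect p.2)

-- invariant relating B's groups dict to A's url_map after the same prefix
def PvRel (g : PySem.Dict String (List (List (String × Option String))))
    (m : PySem.Dict String (List (String × Option String))) : Prop :=
  m.items = g.items.map pvSel ∧ g.keys.Nodup ∧ ∀ p ∈ g.items, p.2 ≠ []

lemma pvSelect_single (c : List (String × Option String)) : pvSelect [c] = c := by
  cases h : pvHasCatchup c <;> simp [pvSelect, List.find?, h]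

lemma pvSelect_append (l : List (List (String × Option String))) (c : List (String × Option String)) (hl : l ≠ []) :
    pvSelect (l ++ [c]) = if pvHasCatchup c && !pvHasCatchup (pvSelect l) then c else pvSelect l := by
  cases hf : l.find? pvHasCatchup with
  | some x =>
    have hx : pvHasCatchup x = true := List.find?_some hf
    have h2 : (l ++ [c]).find? pvHasCatchup = some x := by
      rw [List.find?_append, hf]; rfl
    simp [pvSelect, h2, hf, hx]
  | none =>
    obtain ⟨a, l', rfl⟩ := List.exists_cons_of_ne_nil hl
    have hsel : pvSelect (a :: l') = a := by simp [pvSelect, hf]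
    have hna : pvHasCatchup a = false := by
      have := List.find?_eq_none.mp hf a (by simp)
      simpa using this
    have h2 : List.find? pvHasCatchup ((a :: l') ++ [c]) = List.find? pvHasCatchup [c] := by
      rw [List.find?_append, hf, Option.none_or]
    cases hc : pvHasCatchup c with
    | true =>
      have h3 : pvSelect ((a :: l') ++ [c]) = c := by
        rw [pvSelect, h2]; simp [List.find?, hc]
      rw [h3, hsel, hna]; rfl
    | false =>
      have h3 : pvSelect ((a :: l') ++ [c]) = a := by
        rw [pvSelect, h2]; simp [List.find?, hc]
      rw [h3, hsel]; rfl

lemma pvGet?_mk_map (items : List (String × List (List (String × Option String)))) (k : String) :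
    (PySem.Dict.mk (items.map pvSel)).get? k = ((PySem.Dict.mk items).get? k).map pvSelect := by
  induction items with
  | nil => simp [PySem.Dict.get?]
  | cons p rest ih =>
    simp only [List.map_cons, pvSel]
    rw [PySem.Dict.get?_mk_cons, PySem.Dict.get?_mk_cons]
    by_cases h : (p.1 == k) = true
    · simp [h]
    · simp [h, ih]

lemma pvRel_get? {g m} (hR : PvRel g m) (k : String) : m.get? k = (g.get? k).map pvSelect := by
  have h := hR.1
  have hm : m = PySem.Dict.mk (g.items.map pvSel) := PySem.Dict.ext h
  rw [hm]
  exact pvGet?_mk_map g.items k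

lemma pvRel_step {g m} (hR : PvRel g m) (c : List (String × Option String)) :
    PvRel (pvStepB g c) (pvStepA m c) := by
  obtain ⟨hI, hN, hE⟩ := hR
  have hget := pvRel_get? ⟨hI, hN, hE⟩
  unfold pvStepA pvStepB
  cases hs : pvGet c "stream_url" with
  | none => exact ⟨hI, hN, hE⟩
  | some o =>
    cases o with
    | none => exact ⟨hI, hN, hE⟩
    | some url =>
      dsimp only
      by_cases hu : (url == "") = true
      · rw [if_pos hu, if_pos hu]; exact ⟨hI, hN, hE⟩
      · rw [if_neg hu, if_neg hu]
        cases hg : g.get? url with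
        | none =>
          have hm : m.get? url = none := by rw [hget url, hg]; rfl
          have hc : g.contains url = false := by
            rw [PySem.Dict.contains_eq_isSome_get?, hg]; rfl
          have hcm : m.contains url = false := by
            rw [PySem.Dict.contains_eq_isSome_get?, hm]; rfl
          have hB : g.modify url [] (fun l => l ++ [c]) = g.insert url [c] := by
            simp [PySem.Dict.modify, PySem.Dict.getD_eq_get?_getD, hg]
          rw [hm, hB]
          dsimp only
          refine ⟨?_, ?_, ?_⟩
          · simp [PySem.Dict.items_insert, hc, hcm, hI, pvSel, pvSelect_single]
          · exact PySem.Dict.nodup_keys_insert _ _ _ hN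
          · intro p hp
            rw [PySem.Dict.items_insert] at hp
            simp only [hc, Bool.false_eq_true, if_false] at hp
            rcases List.mem_append.mp hp with h | h
            · exact hE p h
            · simp only [List.mem_singleton] at h
              subst h; simp
        | some l =>
          have hm : m.get? url = some (pvSelect l) := by rw [hget url, hg]; rfl
          have hmem : (url, l) ∈ g.items := PySem.Dict.mem_items_of_get?_eq_some g hg
          have hl : l ≠ [] := hE _ hmem
          have hc : g.contains url = true := by
            rw [PySem.Dict.contains_eq_isSome_get?, hg]; rfl
          have hcm : m.contains url = true := by
            rw [PySem.Dict.contains_eq_isSome_get?, hm]; rfl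
          have hB : g.modify url [] (fun x => x ++ [c]) = g.insert url (l ++ [c]) := by
            simp [PySem.Dict.modify, PySem.Dict.getD_eq_get?_getD, hg]
          rw [hm, hB]
          dsimp only
          have hNodB : (g.insert url (l ++ [c])).keys.Nodup :=
            PySem.Dict.nodup_keys_insert _ _ _ hN
          have hEB : ∀ p ∈ (g.insert url (l ++ [c])).items, p.2 ≠ [] := by
            intro p hp
            rw [PySem.Dict.items_insert] at hp
            simp only [hc, if_true] at hp
            rcases List.mem_map.mp hp with ⟨q, hq, hqe⟩
            by_cases hqk : (q.1 == url) = true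
            · rw [if_pos hqk] at hqe; subst hqe; simp [hl]
            · rw [if_neg hqk] at hqe; subst hqe; exact hE q hq
          by_cases hcond : (pvHasCatchup c && !pvHasCatchup (pvSelect l)) = true
          · rw [if_pos hcond]
            refine ⟨?_, hNodB, hEB⟩
            rw [PySem.Dict.items_insert, PySem.Dict.items_insert]
            simp only [hc, hcm, if_true, hI, List.map_map]
            apply List.map_congr_left
            intro p hp
            by_cases hpk : (p.1 == url) = true
            · have hp1 : p.1 = url := by simpa using hpk
              simp [pvSel, hp1, pvSelect_append l c hl, hcond]
            · have hp1 : p.1 ≠ url := by simpa using hpk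
              simp [pvSel, hp1]
          · rw [if_neg hcond]
            refine ⟨?_, hNodB, hEB⟩
            rw [PySem.Dict.items_insert]
            simp only [hc, if_true, hI, List.map_map]
            apply List.map_congr_left
            intro p hp
            by_cases hpk : (p.1 == url) = true
            · have hp1 : p.1 = url := by simpa using hpk
              have hpl : p.2 = l := by
                have h2 : g.get? p.1 = some p.2 :=
                  PySem.Dict.get?_of_mem_items g (by simpa using hp) hN
                rw [hp1, hg] at h2
                exact (Option.some_inj.mp h2).symm
              have hsa : pvSelect (l ++ [c]) = pvSelect l := by
                rw [pvSelect_append l c hl, if_neg hcond]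
              simp [pvSel, hsa, hp1, hpl]
            · have hp1 : p.1 ≠ url := by simpa using hpk
              simp [pvSel, hp1]

lemma pvRel_foldl (channels : List (List (String × Option String))) :
    ∀ {g m}, PvRel g m → PvRel (channels.foldl pvStepB g) (channels.foldl pvStepA m) := by
  induction channels with
  | nil => intro g m h; exact h
  | cons c rest ih => intro g m h; exact ih (pvRel_step h c)

-- ===== VERDICT (by name: the statement is the Claim_ definition above) =====
theorem deduplicate_channels_py_spec : Claim_equal_deduplicate_channels_py := by
  intro channels _
  unfold Spec_deduplicate_channels_py deduplicate_channels_py deduplicate_channels_py_alt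
  have h0 : PvRel PySem.Dict.empty PySem.Dict.empty := by
    refine ⟨rfl, ?_, ?_⟩ <;> simp [PySem.Dict.empty, PySem.Dict.keys]
  have h := (pvRel_foldl channels h0).1
  simp only [PySem.Dict.values, h, List.map_map]
  rfl
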